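-- pv_equiv track=rewrite | github.com/Parvez49/cse-4-2 | Airtificial Intelligent/queen.py | globalcost
-- ===== SOURCE A (Python) =====
-- def globalcost(m,q):
--     confl = 0
--     for tu in [(1, 0), (0, 1), (-1, 0), (0, -1), (1, 1), (-1, -1), (1, -1),
--                (-1, 1)]:  # checking queen may have in any of them of eight direction
--         ni = q[0]
--         nj = q[1]
--         while True:
--             if (0 > ni or ni == len(m)) or (0 > nj or nj == len(m)):  # boundary of matrix
--                 break
--             ni += tu[0]
--             nj += tu[1]
--             if 0 <= ni and ni < len(m) and 0 <= nj and nj < len(m):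
--                 if m[ni][nj] == 1:
--                     confl += 1
--     return confl
-- ===== SOURCE B (Python) =====
-- def globalcost(m, q):
--     n = len(m)
--     r, c = q[0], q[1]
--     if not (0 <= r < n and 0 <= c < n):
--         return 0
--     cells = ([(r, j) for j in range(n) if j != c]
--              + [(i, c) for i in range(n) if i != r]
--              + [(i, c + (i - r)) for i in range(n) if i != r and 0 <= c + (i - r) < n]
--              + [(i, c - (i - r)) for i in range(n) if i != r and 0 <= c - (i - r) < n])
--     return sum(1 for (i, j) in cells if m[i][j] == 1)
-- ===== Notes on version B (the rewrite author's own statement) =====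
-- stated objective: simpler
-- what changed: A discovers conflicting cells by stepping one square at a time along 8 directions in a while-loop with boundary tests; B enumerates the queen's 4 lines (row, column, two diagonals) directly by index arithmetic over range(n) comprehensions and counts the cells equal to 1 on them.
import Mathlib
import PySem

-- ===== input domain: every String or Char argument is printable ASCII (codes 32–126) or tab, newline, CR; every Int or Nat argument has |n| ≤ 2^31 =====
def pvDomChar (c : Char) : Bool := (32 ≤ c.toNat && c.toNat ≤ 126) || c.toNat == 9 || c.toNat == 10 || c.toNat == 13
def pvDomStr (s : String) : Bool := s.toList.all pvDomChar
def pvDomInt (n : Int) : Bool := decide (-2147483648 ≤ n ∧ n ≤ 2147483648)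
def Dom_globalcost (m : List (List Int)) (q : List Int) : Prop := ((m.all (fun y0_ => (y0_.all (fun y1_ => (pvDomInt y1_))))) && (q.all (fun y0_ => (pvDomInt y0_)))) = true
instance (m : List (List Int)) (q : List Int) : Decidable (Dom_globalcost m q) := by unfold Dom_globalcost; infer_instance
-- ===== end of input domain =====

-- B replaces A's stepwise walk along 8 directions by a direct arithmetic enumeration
-- of the queen's 4 lines (row, column, two diagonals); objective: simpler.

-- ===== PORT A =====

-- m[i][j] as both Pythons access it; inside Pre_ every access is in range, so getD is exact there
def cellv (m : List (List Int)) (i j : Int) : Int :=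
  (PySem.List.pyGet? ((PySem.List.pyGet? m i).getD []) j).getD 0

-- the 'while True' loop of A for one direction (dx,dy); fuel bounds the iterations
-- (inside Pre_ the Python loop breaks after at most len(m)+1 iterations, so fuel len(m)+2 is exact)
def walkGo (m : List (List Int)) (n dx dy : Int) : Nat → Int → Int → Int → Int
  | 0, _, _, confl => confl
  | fuel + 1, ni, nj, confl =>
    if (0 > ni ∨ ni = n) ∨ (0 > nj ∨ nj = n) then confl
    else
      walkGo m n dx dy fuel (ni + dx) (nj + dy)
        (if 0 ≤ ni + dx ∧ ni + dx < n ∧ 0 ≤ nj + dy ∧ nj + dy < n ∧ cellv m (ni + dx) (nj + dy) = 1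
         then confl + 1 else confl)

def dirsA : List (Int × Int) := [(1, 0), (0, 1), (-1, 0), (0, -1), (1, 1), (-1, -1), (1, -1), (-1, 1)]

def globalcost (m : List (List Int)) (q : List Int) : Int :=
  let n : Int := m.length
  dirsA.foldl
    (fun confl tu =>
      walkGo m n tu.1 tu.2 (m.length + 2)
        ((PySem.List.pyGet? q 0).getD 0) ((PySem.List.pyGet? q 1).getD 0) confl)
    0

-- ===== PORT B =====

def globalcost_alt (m : List (List Int)) (q : List Int) : Int :=
  let n : Int := m.length
  let r := (PySem.List.pyGet? q 0).getD 0
  let c := (PySem.List.pyGet? q 1).getD 0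
  if ¬(0 ≤ r ∧ r < n ∧ 0 ≤ c ∧ c < n) then 0
  else
    let cells : List (Int × Int) :=
      ((PySem.List.pyRange 0 n 1).filter (fun j => j != c)).map (fun j => (r, j))
      ++ ((PySem.List.pyRange 0 n 1).filter (fun i => i != r)).map (fun i => (i, c))
      ++ ((PySem.List.pyRange 0 n 1).filter
            (fun i => i != r && decide (0 ≤ c + (i - r)) && decide (c + (i - r) < n))).map
          (fun i => (i, c + (i - r)))
      ++ ((PySem.List.pyRange 0 n 1).filter
            (fun i => i != r && decide (0 ≤ c - (i - r)) && decide (c - (i - r) < n))).map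
          (fun i => (i, c - (i - r)))
    ((cells.filter (fun p => cellv m p.1 p.2 == 1)).length : Int)

-- ===== PRECONDITION & SPEC =====

def rowLen (m : List (List Int)) (i : Int) : Int := ((PySem.List.pyGet? m i).getD []).length

-- Pre_ excludes exactly the inputs where Python A does not return normally: q shorter than 2
-- (IndexError on q[0]/q[1]), a q coordinate strictly beyond len(m) whose walk never meets the
-- '== len(m)' boundary test (infinite loop), and ragged matrices where some cell on one of the
-- queen's lines is accessed past its row's length (IndexError).
def Pre_globalcost (m : List (List Int)) (q : List Int) : Prop :=
  2 ≤ q.length ∧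
  (let n : Int := m.length
   let r := (PySem.List.pyGet? q 0).getD 0
   let c := (PySem.List.pyGet? q 1).getD 0
   ¬(r > n ∧ 0 ≤ c ∧ c ≠ n) ∧ ¬(c > n ∧ 0 ≤ r ∧ r ≠ n) ∧
   ((0 ≤ r ∧ r < n ∧ 0 ≤ c ∧ c < n) →
     (∀ j ∈ List.range m.length, (j : Int) ≠ c → (j : Int) < rowLen m r) ∧
     (∀ i ∈ List.range m.length, (i : Int) ≠ r →
        c < rowLen m i ∧
        (0 ≤ c + ((i : Int) - r) → c + ((i : Int) - r) < n → c + ((i : Int) - r) < rowLen m i) ∧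
        (0 ≤ c - ((i : Int) - r) → c - ((i : Int) - r) < n → c - ((i : Int) - r) < rowLen m i))))

instance (m : List (List Int)) (q : List Int) : Decidable (Pre_globalcost m q) := by
  unfold Pre_globalcost; infer_instance

def pvWitness_globalcost : List (List Int) × List Int := ([[0, 1], [1, 0]], [0, 0])

def Spec_globalcost (m : List (List Int)) (q : List Int) (out : Int) : Prop := out = globalcost_alt m q
instance (m : List (List Int)) (q : List Int) (out : Int) : Decidable (Spec_globalcost m q out) := by
  unfold Spec_globalcost; infer_instance

-- ===== CLAIM (what is proved, stated in full; the proofs are below) =====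
def Claim_equal_globalcost : Prop := ∀ (m : List (List Int)) (q : List Int), Dom_globalcost m q → Pre_globalcost m q → Spec_globalcost m q (globalcost m q)

-- ===== LEMMAS AND PROOFS =====

-- count of marked in-grid cells on the open ray from (r,c) in direction (dx,dy)
def rayCnt (m : List (List Int)) (r c dx dy lo : Int) : ℕ :=
  (PySem.List.pyRange lo ((m.length : Int) + 1) 1).countP
    (fun k => decide (0 ≤ r + k * dx ∧ r + k * dx < (m.length : Int) ∧
              0 ≤ c + k * dy ∧ c + k * dy < (m.length : Int) ∧
              cellv m (r + k * dx) (c + k * dy) = 1))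

theorem walkGo_eq (m : List (List Int)) (r c dx dy : Int)
    (hr : 0 ≤ r ∧ r < (m.length : Int)) (hc : 0 ≤ c ∧ c < (m.length : Int))
    (hdx : dx = -1 ∨ dx = 0 ∨ dx = 1) (hdy : dy = -1 ∨ dy = 0 ∨ dy = 1)
    (hd : ¬(dx = 0 ∧ dy = 0)) :
    ∀ (fuel : ℕ) (t confl : Int), 0 ≤ t → (m.length : Int) + 1 ≤ (fuel : Int) + t →
      walkGo m (m.length : Int) dx dy fuel (r + t * dx) (c + t * dy) confl
        = confl + rayCnt m r c dx dy (t + 1) := by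
  intro fuel
  induction fuel with
  | zero =>
    intro t confl ht0 ht
    have hnil : PySem.List.pyRange (t + 1) ((m.length : Int) + 1) 1 = [] :=
      PySem.List.pyRange_one_eq_nil (by omega)
    simp [walkGo, rayCnt, hnil]
  | succ fuel ih =>
    intro t confl ht0 ht
    by_cases hbr : (0 > r + t * dx ∨ r + t * dx = (m.length : Int)) ∨
        (0 > c + t * dy ∨ c + t * dy = (m.length : Int))
    · have hzero : rayCnt m r c dx dy (t + 1) = 0 := by
        unfold rayCnt
        rw [List.countP_eq_zero]
        intro k hk
        rw [PySem.List.mem_pyRange_one] at hk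
        simp only [decide_eq_true_eq, not_and]
        intro h1 h2 h3 h4
        rcases hdx with rfl | rfl | rfl <;> rcases hdy with rfl | rfl | rfl <;> omega
      rw [hzero]
      simp [walkGo, hbr]
    · have hstep : walkGo m (m.length : Int) dx dy (fuel + 1) (r + t * dx) (c + t * dy) confl
          = walkGo m (m.length : Int) dx dy fuel (r + t * dx + dx) (c + t * dy + dy)
            (if 0 ≤ r + t * dx + dx ∧ r + t * dx + dx < (m.length : Int) ∧
                0 ≤ c + t * dy + dy ∧ c + t * dy + dy < (m.length : Int) ∧
                cellv m (r + t * dx + dx) (c + t * dy + dy) = 1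
             then confl + 1 else confl) := by
        simp [walkGo, hbr]
      have harx : r + t * dx + dx = r + (t + 1) * dx := by ring
      have hary : c + t * dy + dy = c + (t + 1) * dy := by ring
      have hfc : (m.length : Int) + 1 ≤ (fuel : Int) + (t + 1) := by push_cast at ht ⊢; omega
      rw [hstep, harx, hary, ih (t + 1) _ (by omega) hfc]
      by_cases hle : t + 1 ≤ (m.length : Int)
      · have hcons : PySem.List.pyRange (t + 1) ((m.length : Int) + 1) 1
            = (t + 1) :: PySem.List.pyRange (t + 1 + 1) ((m.length : Int) + 1) 1 :=
          PySem.List.pyRange_one_cons (by omega)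
        unfold rayCnt
        rw [hcons, List.countP_cons]
        by_cases hP : 0 ≤ r + (t + 1) * dx ∧ r + (t + 1) * dx < (m.length : Int) ∧
            0 ≤ c + (t + 1) * dy ∧ c + (t + 1) * dy < (m.length : Int) ∧
            cellv m (r + (t + 1) * dx) (c + (t + 1) * dy) = 1
        · rw [if_pos hP]
          simp only [hP, decide_eq_true_eq, decide_true, and_self, if_true]
          push_cast
          omega
        · rw [if_neg hP]
          simp only [hP, decide_false, Bool.false_eq_true, if_false]
          omega
      · have hnil1 : PySem.List.pyRange (t + 1) ((m.length : Int) + 1) 1 = [] :=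
          PySem.List.pyRange_one_eq_nil (by omega)
        have hnil2 : PySem.List.pyRange (t + 1 + 1) ((m.length : Int) + 1) 1 = [] :=
          PySem.List.pyRange_one_eq_nil (by omega)
        have hPf : ¬(0 ≤ r + (t + 1) * dx ∧ r + (t + 1) * dx < (m.length : Int) ∧
            0 ≤ c + (t + 1) * dy ∧ c + (t + 1) * dy < (m.length : Int) ∧
            cellv m (r + (t + 1) * dx) (c + (t + 1) * dy) = 1) := by
          push_neg at hbr
          rintro ⟨h1, h2, h3, h4, -⟩
          rcases hdx with rfl | rfl | rfl <;> rcases hdy with rfl | rfl | rfl <;>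
            simp_all <;> omega
        rw [if_neg hPf]
        unfold rayCnt
        rw [hnil1, hnil2]

theorem walkGo_start (m : List (List Int)) (r c dx dy : Int)
    (hr : 0 ≤ r ∧ r < (m.length : Int)) (hc : 0 ≤ c ∧ c < (m.length : Int))
    (hdx : dx = -1 ∨ dx = 0 ∨ dx = 1) (hdy : dy = -1 ∨ dy = 0 ∨ dy = 1)
    (hd : ¬(dx = 0 ∧ dy = 0)) (confl : Int) :
    walkGo m (m.length : Int) dx dy (m.length + 2) r c confl
      = confl + rayCnt m r c dx dy 1 := by
  have h := walkGo_eq m r c dx dy hr hc hdx hdy hd (m.length + 2) 0 confl le_rfl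
    (by push_cast; omega)
  simpa using h

theorem walkGo_break (m : List (List Int)) (n dx dy ni nj : Int)
    (h : (0 > ni ∨ ni = n) ∨ (0 > nj ∨ nj = n)) :
    ∀ (fuel : ℕ) (confl : Int), walkGo m n dx dy fuel ni nj confl = confl := by
  intro fuel confl
  cases fuel <;> simp [walkGo, h]

theorem A_rays (m : List (List Int)) (q : List Int) (r c : Int)
    (hqr : (PySem.List.pyGet? q 0).getD 0 = r) (hqc : (PySem.List.pyGet? q 1).getD 0 = c)
    (hr : 0 ≤ r ∧ r < (m.length : Int)) (hc : 0 ≤ c ∧ c < (m.length : Int)) :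
    globalcost m q
      = (rayCnt m r c 1 0 1 : Int) + rayCnt m r c 0 1 1 + rayCnt m r c (-1) 0 1
        + rayCnt m r c 0 (-1) 1 + rayCnt m r c 1 1 1 + rayCnt m r c (-1) (-1) 1
        + rayCnt m r c 1 (-1) 1 + rayCnt m r c (-1) 1 1 := by
  simp only [globalcost, dirsA, List.foldl_cons, List.foldl_nil, hqr, hqc]
  rw [walkGo_start m r c 1 0 hr hc (by norm_num) (by norm_num) (by norm_num),
      walkGo_start m r c 0 1 hr hc (by norm_num) (by norm_num) (by norm_num),
      walkGo_start m r c (-1) 0 hr hc (by norm_num) (by norm_num) (by norm_num),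
      walkGo_start m r c 0 (-1) hr hc (by norm_num) (by norm_num) (by norm_num),
      walkGo_start m r c 1 1 hr hc (by norm_num) (by norm_num) (by norm_num),
      walkGo_start m r c (-1) (-1) hr hc (by norm_num) (by norm_num) (by norm_num),
      walkGo_start m r c 1 (-1) hr hc (by norm_num) (by norm_num) (by norm_num),
      walkGo_start m r c (-1) 1 hr hc (by norm_num) (by norm_num) (by norm_num)]
  ring

theorem countP_pyRange_card (a b : ℤ) (p : ℤ → Bool) :
    (PySem.List.pyRange a b 1).countP p
      = ((Finset.Icc a (b - 1)).filter (fun k => p k = true)).card := by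
  have hnd : ((PySem.List.pyRange a b 1).filter p).Nodup :=
    (PySem.List.nodup_pyRange_one a b).filter _
  have hset : (PySem.List.pyRange a b 1).toFinset = Finset.Icc a (b - 1) := by
    ext x
    simp only [List.mem_toFinset, PySem.List.mem_pyRange_one, Finset.mem_Icc]
    omega
  calc (PySem.List.pyRange a b 1).countP p
      = ((PySem.List.pyRange a b 1).filter p).length := List.countP_eq_length_filter
    _ = ((PySem.List.pyRange a b 1).filter p).toFinset.card := by
        rw [List.card_toFinset, List.Nodup.dedup hnd]
    _ = ((PySem.List.pyRange a b 1).toFinset.filter (fun k => p k = true)).card := by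
        rw [List.toFinset_filter]
    _ = ((Finset.Icc a (b - 1)).filter (fun k => p k = true)).card := by rw [hset]

theorem split_line (N r : ℤ) (hr0 : 0 ≤ r) (hrN : r < N) (P : ℤ → Prop) [DecidablePred P] :
    ((Finset.Icc 1 N).filter (fun k => 0 ≤ r + k ∧ r + k < N ∧ P (r + k))).card
      + ((Finset.Icc 1 N).filter (fun k => 0 ≤ r - k ∧ r - k < N ∧ P (r - k))).card
      = ((Finset.Icc 0 (N - 1)).filter (fun i => i ≠ r ∧ P i)).card := by
  have hplus : ((Finset.Icc 1 N).filter (fun k => 0 ≤ r + k ∧ r + k < N ∧ P (r + k))).card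
      = ((Finset.Icc 0 (N - 1)).filter (fun i => r < i ∧ P i)).card := by
    apply Finset.card_nbij' (i := fun k => r + k) (j := fun i => i - r)
    · intro k hk
      simp only [Finset.coe_filter, Set.mem_setOf_eq, Finset.mem_Icc] at hk ⊢
      exact ⟨⟨by omega, by omega⟩, by omega, hk.2.2.2⟩
    · intro x hx
      simp only [Finset.coe_filter, Set.mem_setOf_eq, Finset.mem_Icc] at hx ⊢
      refine ⟨⟨by omega, by omega⟩, by omega, by omega, ?_⟩
      have : r + (x - r) = x := by ring
      rw [this]; exact hx.2.2
    · intro k _; simp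
    · intro x _; simp
  have hminus : ((Finset.Icc 1 N).filter (fun k => 0 ≤ r - k ∧ r - k < N ∧ P (r - k))).card
      = ((Finset.Icc 0 (N - 1)).filter (fun i => i < r ∧ P i)).card := by
    apply Finset.card_nbij' (i := fun k => r - k) (j := fun i => r - i)
    · intro k hk
      simp only [Finset.coe_filter, Set.mem_setOf_eq, Finset.mem_Icc] at hk ⊢
      exact ⟨⟨by omega, by omega⟩, by omega, hk.2.2.2⟩
    · intro x hx
      simp only [Finset.coe_filter, Set.mem_setOf_eq, Finset.mem_Icc] at hx ⊢
      refine ⟨⟨by omega, by omega⟩, by omega, by omega, ?_⟩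
      have : r - (r - x) = x := by ring
      rw [this]; exact hx.2.2
    · intro k _; simp
    · intro x _; simp
  have hunion : (Finset.Icc 0 (N - 1)).filter (fun i => i ≠ r ∧ P i)
      = ((Finset.Icc 0 (N - 1)).filter (fun i => i < r ∧ P i))
        ∪ ((Finset.Icc 0 (N - 1)).filter (fun i => r < i ∧ P i)) := by
    ext x
    simp only [Finset.mem_filter, Finset.mem_union, Finset.mem_Icc]
    constructor
    · rintro ⟨hx, hne, hP⟩
      rcases lt_or_gt_of_ne hne with h | h
      · exact Or.inl ⟨hx, h, hP⟩
      · exact Or.inr ⟨hx, h, hP⟩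
    · rintro (⟨hx, h, hP⟩ | ⟨hx, h, hP⟩) <;> exact ⟨hx, by omega, hP⟩
  have hdisj : Disjoint ((Finset.Icc 0 (N - 1)).filter (fun i => i < r ∧ P i))
      ((Finset.Icc 0 (N - 1)).filter (fun i => r < i ∧ P i)) := by
    rw [Finset.disjoint_left]
    intro x hx hx'
    simp only [Finset.mem_filter] at hx hx'
    omega
  rw [hplus, hminus, hunion, Finset.card_union_of_disjoint hdisj]
  omega

theorem lineLen (m : List (List Int)) (f : Int → Bool) (g : Int → Int × Int) :
    ((((PySem.List.pyRange 0 (m.length : Int) 1).filter f).map g).filter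
        (fun p => cellv m p.1 p.2 == 1)).length
      = ((Finset.Icc 0 ((m.length : Int) - 1)).filter
          (fun k => f k = true ∧ cellv m (g k).1 (g k).2 = 1)).card := by
  rw [List.filter_map, List.length_map, List.filter_filter, ← List.countP_eq_length_filter,
      countP_pyRange_card]
  apply congrArg
  apply Finset.filter_congr
  intro k _
  simp only [Function.comp, Bool.and_eq_true, beq_iff_eq, decide_eq_true_eq]
  exact and_comm

theorem pair_row (m : List (List Int)) (r c : Int)
    (hr : 0 ≤ r ∧ r < (m.length : Int)) (hc : 0 ≤ c ∧ c < (m.length : Int)) :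
    rayCnt m r c 0 1 1 + rayCnt m r c 0 (-1) 1
      = ((Finset.Icc 0 ((m.length : Int) - 1)).filter
          (fun j => j ≠ c ∧ cellv m r j = 1)).card := by
  unfold rayCnt
  rw [countP_pyRange_card, countP_pyRange_card,
      show (m.length : Int) + 1 - 1 = (m.length : Int) from by ring]
  rw [show ((Finset.Icc 1 (m.length : Int)).filter (fun k =>
        decide (0 ≤ r + k * 0 ∧ r + k * 0 < (m.length : Int) ∧ 0 ≤ c + k * 1 ∧
          c + k * 1 < (m.length : Int) ∧ cellv m (r + k * 0) (c + k * 1) = 1) = true))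
      = ((Finset.Icc 1 (m.length : Int)).filter (fun k =>
          0 ≤ c + k ∧ c + k < (m.length : Int) ∧ cellv m r (c + k) = 1)) from
    Finset.filter_congr (fun k _ => by simp [hr.1, hr.2])]
  rw [show ((Finset.Icc 1 (m.length : Int)).filter (fun k =>
        decide (0 ≤ r + k * 0 ∧ r + k * 0 < (m.length : Int) ∧ 0 ≤ c + k * (-1) ∧
          c + k * (-1) < (m.length : Int) ∧ cellv m (r + k * 0) (c + k * (-1)) = 1) = true))
      = ((Finset.Icc 1 (m.length : Int)).filter (fun k =>
          0 ≤ c - k ∧ c - k < (m.length : Int) ∧ cellv m r (c - k) = 1)) from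
    Finset.filter_congr (fun k _ => by simp [hr.1, hr.2, sub_eq_add_neg])]
  exact split_line (m.length : Int) c hc.1 hc.2 (fun j => cellv m r j = 1)

theorem pair_col (m : List (List Int)) (r c : Int)
    (hr : 0 ≤ r ∧ r < (m.length : Int)) (hc : 0 ≤ c ∧ c < (m.length : Int)) :
    rayCnt m r c 1 0 1 + rayCnt m r c (-1) 0 1
      = ((Finset.Icc 0 ((m.length : Int) - 1)).filter
          (fun i => i ≠ r ∧ cellv m i c = 1)).card := by
  unfold rayCnt
  rw [countP_pyRange_card, countP_pyRange_card,
      show (m.length : Int) + 1 - 1 = (m.length : Int) from by ring]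
  rw [show ((Finset.Icc 1 (m.length : Int)).filter (fun k =>
        decide (0 ≤ r + k * 1 ∧ r + k * 1 < (m.length : Int) ∧ 0 ≤ c + k * 0 ∧
          c + k * 0 < (m.length : Int) ∧ cellv m (r + k * 1) (c + k * 0) = 1) = true))
      = ((Finset.Icc 1 (m.length : Int)).filter (fun k =>
          0 ≤ r + k ∧ r + k < (m.length : Int) ∧ cellv m (r + k) c = 1)) from
    Finset.filter_congr (fun k _ => by simp [hc.1, hc.2])]
  rw [show ((Finset.Icc 1 (m.length : Int)).filter (fun k =>
        decide (0 ≤ r + k * (-1) ∧ r + k * (-1) < (m.length : Int) ∧ 0 ≤ c + k * 0 ∧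
          c + k * 0 < (m.length : Int) ∧ cellv m (r + k * (-1)) (c + k * 0) = 1) = true))
      = ((Finset.Icc 1 (m.length : Int)).filter (fun k =>
          0 ≤ r - k ∧ r - k < (m.length : Int) ∧ cellv m (r - k) c = 1)) from
    Finset.filter_congr (fun k _ => by simp [hc.1, hc.2, sub_eq_add_neg])]
  exact split_line (m.length : Int) r hr.1 hr.2 (fun i => cellv m i c = 1)

theorem pair_d1 (m : List (List Int)) (r c : Int)
    (hr : 0 ≤ r ∧ r < (m.length : Int)) (hc : 0 ≤ c ∧ c < (m.length : Int)) :
    rayCnt m r c 1 1 1 + rayCnt m r c (-1) (-1) 1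
      = ((Finset.Icc 0 ((m.length : Int) - 1)).filter
          (fun i => i ≠ r ∧ 0 ≤ c + (i - r) ∧ c + (i - r) < (m.length : Int) ∧
            cellv m i (c + (i - r)) = 1)).card := by
  unfold rayCnt
  rw [countP_pyRange_card, countP_pyRange_card,
      show (m.length : Int) + 1 - 1 = (m.length : Int) from by ring]
  rw [show ((Finset.Icc 1 (m.length : Int)).filter (fun k =>
        decide (0 ≤ r + k * 1 ∧ r + k * 1 < (m.length : Int) ∧ 0 ≤ c + k * 1 ∧
          c + k * 1 < (m.length : Int) ∧ cellv m (r + k * 1) (c + k * 1) = 1) = true))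
      = ((Finset.Icc 1 (m.length : Int)).filter (fun k =>
          0 ≤ r + k ∧ r + k < (m.length : Int) ∧ 0 ≤ c + (r + k - r) ∧
          c + (r + k - r) < (m.length : Int) ∧ cellv m (r + k) (c + (r + k - r)) = 1)) from
    Finset.filter_congr (fun k _ => by
      simp only [mul_one, add_sub_cancel_left, decide_eq_true_eq])]
  rw [show ((Finset.Icc 1 (m.length : Int)).filter (fun k =>
        decide (0 ≤ r + k * (-1) ∧ r + k * (-1) < (m.length : Int) ∧ 0 ≤ c + k * (-1) ∧
          c + k * (-1) < (m.length : Int) ∧ cellv m (r + k * (-1)) (c + k * (-1)) = 1) = true))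
      = ((Finset.Icc 1 (m.length : Int)).filter (fun k =>
          0 ≤ r - k ∧ r - k < (m.length : Int) ∧ 0 ≤ c + (r - k - r) ∧
          c + (r - k - r) < (m.length : Int) ∧ cellv m (r - k) (c + (r - k - r)) = 1)) from
    Finset.filter_congr (fun k _ => by
      have h1 : r + k * (-1) = r - k := by ring
      have h2 : c + k * (-1) = c + (r - k - r) := by ring
      rw [h1, h2]
      simp)]
  exact split_line (m.length : Int) r hr.1 hr.2
    (fun i => 0 ≤ c + (i - r) ∧ c + (i - r) < (m.length : Int) ∧ cellv m i (c + (i - r)) = 1)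

theorem pair_d2 (m : List (List Int)) (r c : Int)
    (hr : 0 ≤ r ∧ r < (m.length : Int)) (hc : 0 ≤ c ∧ c < (m.length : Int)) :
    rayCnt m r c 1 (-1) 1 + rayCnt m r c (-1) 1 1
      = ((Finset.Icc 0 ((m.length : Int) - 1)).filter
          (fun i => i ≠ r ∧ 0 ≤ c - (i - r) ∧ c - (i - r) < (m.length : Int) ∧
            cellv m i (c - (i - r)) = 1)).card := by
  unfold rayCnt
  rw [countP_pyRange_card, countP_pyRange_card,
      show (m.length : Int) + 1 - 1 = (m.length : Int) from by ring]
  rw [show ((Finset.Icc 1 (m.length : Int)).filter (fun k =>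
        decide (0 ≤ r + k * 1 ∧ r + k * 1 < (m.length : Int) ∧ 0 ≤ c + k * (-1) ∧
          c + k * (-1) < (m.length : Int) ∧ cellv m (r + k * 1) (c + k * (-1)) = 1) = true))
      = ((Finset.Icc 1 (m.length : Int)).filter (fun k =>
          0 ≤ r + k ∧ r + k < (m.length : Int) ∧ 0 ≤ c - (r + k - r) ∧
          c - (r + k - r) < (m.length : Int) ∧ cellv m (r + k) (c - (r + k - r)) = 1)) from
    Finset.filter_congr (fun k _ => by
      have h2 : c + k * (-1) = c - (r + k - r) := by ring
      rw [mul_one, h2]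
      simp)]
  rw [show ((Finset.Icc 1 (m.length : Int)).filter (fun k =>
        decide (0 ≤ r + k * (-1) ∧ r + k * (-1) < (m.length : Int) ∧ 0 ≤ c + k * 1 ∧
          c + k * 1 < (m.length : Int) ∧ cellv m (r + k * (-1)) (c + k * 1) = 1) = true))
      = ((Finset.Icc 1 (m.length : Int)).filter (fun k =>
          0 ≤ r - k ∧ r - k < (m.length : Int) ∧ 0 ≤ c - (r - k - r) ∧
          c - (r - k - r) < (m.length : Int) ∧ cellv m (r - k) (c - (r - k - r)) = 1)) from
    Finset.filter_congr (fun k _ => by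
      have h1 : r + k * (-1) = r - k := by ring
      have h2 : c + k * 1 = c - (r - k - r) := by ring
      rw [h1, h2]
      simp)]
  exact split_line (m.length : Int) r hr.1 hr.2
    (fun i => 0 ≤ c - (i - r) ∧ c - (i - r) < (m.length : Int) ∧ cellv m i (c - (i - r)) = 1)

theorem B_lines (m : List (List Int)) (q : List Int) (r c : Int)
    (hqr : (PySem.List.pyGet? q 0).getD 0 = r) (hqc : (PySem.List.pyGet? q 1).getD 0 = c)
    (hin : 0 ≤ r ∧ r < (m.length : Int) ∧ 0 ≤ c ∧ c < (m.length : Int)) :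
    globalcost_alt m q
      = (((Finset.Icc 0 ((m.length : Int) - 1)).filter
            (fun j => j ≠ c ∧ cellv m r j = 1)).card : Int)
        + ((Finset.Icc 0 ((m.length : Int) - 1)).filter
            (fun i => i ≠ r ∧ cellv m i c = 1)).card
        + ((Finset.Icc 0 ((m.length : Int) - 1)).filter
            (fun i => i ≠ r ∧ 0 ≤ c + (i - r) ∧ c + (i - r) < (m.length : Int) ∧
              cellv m i (c + (i - r)) = 1)).card
        + ((Finset.Icc 0 ((m.length : Int) - 1)).filter
            (fun i => i ≠ r ∧ 0 ≤ c - (i - r) ∧ c - (i - r) < (m.length : Int) ∧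
              cellv m i (c - (i - r)) = 1)).card := by
  simp only [globalcost_alt, hqr, hqc]
  rw [if_neg (not_not_intro hin)]
  rw [List.filter_append, List.filter_append, List.filter_append,
      List.length_append, List.length_append, List.length_append,
      lineLen, lineLen, lineLen, lineLen]
  have e1 : ((Finset.Icc 0 ((m.length : Int) - 1)).filter
        (fun k => (k != c) = true ∧ cellv m (r, k).1 (r, k).2 = 1))
      = ((Finset.Icc 0 ((m.length : Int) - 1)).filter (fun j => j ≠ c ∧ cellv m r j = 1)) :=
    Finset.filter_congr (fun k _ => by simp)
  have e2 : ((Finset.Icc 0 ((m.length : Int) - 1)).filter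
        (fun k => (k != r) = true ∧ cellv m (k, c).1 (k, c).2 = 1))
      = ((Finset.Icc 0 ((m.length : Int) - 1)).filter (fun i => i ≠ r ∧ cellv m i c = 1)) :=
    Finset.filter_congr (fun k _ => by simp)
  have e3 : ((Finset.Icc 0 ((m.length : Int) - 1)).filter
        (fun k => (k != r && decide (0 ≤ c + (k - r)) && decide (c + (k - r) < (m.length : Int))) = true
          ∧ cellv m (k, c + (k - r)).1 (k, c + (k - r)).2 = 1))
      = ((Finset.Icc 0 ((m.length : Int) - 1)).filter
          (fun i => i ≠ r ∧ 0 ≤ c + (i - r) ∧ c + (i - r) < (m.length : Int) ∧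
            cellv m i (c + (i - r)) = 1)) :=
    Finset.filter_congr (fun k _ => by
      simp [Bool.and_eq_true, and_assoc])
  have e4 : ((Finset.Icc 0 ((m.length : Int) - 1)).filter
        (fun k => (k != r && decide (0 ≤ c - (k - r)) && decide (c - (k - r) < (m.length : Int))) = true
          ∧ cellv m (k, c - (k - r)).1 (k, c - (k - r)).2 = 1))
      = ((Finset.Icc 0 ((m.length : Int) - 1)).filter
          (fun i => i ≠ r ∧ 0 ≤ c - (i - r) ∧ c - (i - r) < (m.length : Int) ∧
            cellv m i (c - (i - r)) = 1)) :=
    Finset.filter_congr (fun k _ => by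
      simp [Bool.and_eq_true, and_assoc])
  rw [e1, e2, e3, e4]
  push_cast
  ring

theorem globalcost_spec : Claim_equal_globalcost := by
  intro m q hdom hpre
  show globalcost m q = globalcost_alt m q
  obtain ⟨hq2, hnd1, hnd2, hrag⟩ := hpre
  by_cases hin : 0 ≤ (PySem.List.pyGet? q 0).getD 0 ∧
      (PySem.List.pyGet? q 0).getD 0 < (m.length : Int) ∧
      0 ≤ (PySem.List.pyGet? q 1).getD 0 ∧ (PySem.List.pyGet? q 1).getD 0 < (m.length : Int)
  · rw [A_rays m q _ _ rfl rfl ⟨hin.1, hin.2.1⟩ ⟨hin.2.2.1, hin.2.2.2⟩,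
        B_lines m q _ _ rfl rfl hin]
    have h1 := pair_row m ((PySem.List.pyGet? q 0).getD 0) ((PySem.List.pyGet? q 1).getD 0)
      ⟨hin.1, hin.2.1⟩ ⟨hin.2.2.1, hin.2.2.2⟩
    have h2 := pair_col m ((PySem.List.pyGet? q 0).getD 0) ((PySem.List.pyGet? q 1).getD 0)
      ⟨hin.1, hin.2.1⟩ ⟨hin.2.2.1, hin.2.2.2⟩
    have h3 := pair_d1 m ((PySem.List.pyGet? q 0).getD 0) ((PySem.List.pyGet? q 1).getD 0)
      ⟨hin.1, hin.2.1⟩ ⟨hin.2.2.1, hin.2.2.2⟩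
    have h4 := pair_d2 m ((PySem.List.pyGet? q 0).getD 0) ((PySem.List.pyGet? q 1).getD 0)
      ⟨hin.1, hin.2.1⟩ ⟨hin.2.2.1, hin.2.2.2⟩
    omega
  · have hbk : (0 > (PySem.List.pyGet? q 0).getD 0 ∨
        (PySem.List.pyGet? q 0).getD 0 = (m.length : Int)) ∨
        (0 > (PySem.List.pyGet? q 1).getD 0 ∨
        (PySem.List.pyGet? q 1).getD 0 = (m.length : Int)) := by omega
    simp only [globalcost, dirsA, List.foldl_cons, List.foldl_nil]
    rw [walkGo_break m (m.length : Int) 1 0 _ _ hbk,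
        walkGo_break m (m.length : Int) 0 1 _ _ hbk,
        walkGo_break m (m.length : Int) (-1) 0 _ _ hbk,
        walkGo_break m (m.length : Int) 0 (-1) _ _ hbk,
        walkGo_break m (m.length : Int) 1 1 _ _ hbk,
        walkGo_break m (m.length : Int) (-1) (-1) _ _ hbk,
        walkGo_break m (m.length : Int) 1 (-1) _ _ hbk,
        walkGo_break m (m.length : Int) (-1) 1 _ _ hbk]
    simp only [globalcost_alt]
    rw [if_pos hin]
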